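-- pv_equiv track=rewrite | github.com/byeongmin-kwak/Baekjoon-Programmers | 프로그래머스/2/60057. 문자열 압축/문자열 압축.py | solve
-- ===== SOURCE A (Python) =====
-- def solve(n, s):
--     result = ''
--     i = 0
--     while i < len(s):
--         cnt = 1
--         tmp = s[i:i+n]
--         for j in range(i+n, len(s), n):
--             if s[j:j+n] == tmp:
--                 cnt += 1
--             else:
--                 break
--         if cnt > 1:
--             result += str(cnt) + tmp
--         else:
--             result += tmp
--
--         i += n*cnt
--
--     return len(result)
-- ===== SOURCE B (Python) =====
-- def solve(n, s):
--     L = len(s)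
--     if L == 0:
--         return 0
--     nb = -(-L // n)                      # number of n-blocks
--     starts = {0}                         # block indices where a new run begins
--     if L % n:
--         starts.add(nb - 1)               # a short final block can never extend a run
--     for t in range(L - n):               # one shifted-character scan finds all boundaries
--         if s[t] != s[t + n]:
--             starts.add(t // n + 1)
--     ss = sorted(starts)
--     total = 0
--     for a, b in zip(ss, ss[1:] + [nb]):  # run = blocks [a, b)
--         cnt = b - a
--         total += min(n, L - a * n) + (0 if cnt == 1 else len(str(cnt)))
--     return total
-- ===== Notes on version B (the rewrite author's own statement) =====
-- stated objective: alternative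
-- what changed: B never compares block slices or counts a run in place: one shifted-character scan (s[t] != s[t+n]) collects the run-boundary block indices into a set, a short final block and index 0 are added, and the answer is summed from the differences of the sorted boundaries, whereas A advances an index block by block with an inner break-scan and measures a concatenated result string.
import Mathlib
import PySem

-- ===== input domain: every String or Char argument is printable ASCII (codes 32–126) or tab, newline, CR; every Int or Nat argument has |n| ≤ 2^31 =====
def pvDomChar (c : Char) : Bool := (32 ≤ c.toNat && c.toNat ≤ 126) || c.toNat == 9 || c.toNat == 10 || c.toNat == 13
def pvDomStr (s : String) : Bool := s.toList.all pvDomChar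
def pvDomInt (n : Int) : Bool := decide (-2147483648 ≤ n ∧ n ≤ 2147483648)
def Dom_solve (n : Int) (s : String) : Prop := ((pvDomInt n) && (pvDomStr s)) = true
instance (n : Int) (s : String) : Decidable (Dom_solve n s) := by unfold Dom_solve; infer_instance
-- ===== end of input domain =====

-- B finds the run boundaries of the n-block sequence with one shifted-character scan
-- (s[t] != s[t+n]) collected into a set, sorts them, and sums contributions from
-- consecutive boundary differences — no block slices are ever compared.

-- ===== PORT A =====
-- inner 'for j in range(i+n, len(s), n): if s[j:j+n]==tmp: cnt+=1 else: break'
def forCnt (chars : List Char) (n : Int) (tmp : List Char) : List Int → Int → Int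
  | [], cnt => cnt
  | j :: js, cnt =>
    if PySem.List.slice chars (some j) (some (j + n)) = tmp then forCnt chars n tmp js (cnt + 1)
    else cnt

-- the 'while i < len(s)' loop; fuel = len(s)+1 suffices on Pre_ inputs (i grows by n*cnt ≥ 1 each pass)
def whileLoop (n : Int) (chars : List Char) : Nat → Int → List Char → List Char
  | 0, _, result => result
  | fuel + 1, i, result =>
    if i < (chars.length : Int) then
      let tmp := PySem.List.slice chars (some i) (some (i + n))
      let cnt := forCnt chars n tmp (PySem.List.pyRange (i + n) chars.length n) 1
      let result' := result ++ (if 1 < cnt then PySem.Int.toChars cnt ++ tmp else tmp)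
      whileLoop n chars fuel (i + n * cnt) result'
    else result

def solve (n : Int) (s : String) : Int :=
  ((whileLoop n s.toList (s.toList.length + 1) 0 []).length : Int)

-- ===== PORT B =====
def solve_alt (n : Int) (s : String) : Int :=
  let chars := s.toList
  let L : Int := (chars.length : Int)
  if L = 0 then 0
  else
    let nb : Int := -(PySem.Int.floordiv (-L) n)          -- -(-L // n)
    let starts0 : PySem.Set Int := PySem.Set.ofList [0]
    let starts1 : PySem.Set Int :=
      if PySem.Int.mod L n ≠ 0 then PySem.Set.add starts0 (nb - 1) else starts0
    let starts : PySem.Set Int :=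
      (PySem.List.pyRange 0 (L - n) 1).foldl
        (fun st t =>
          if PySem.List.pyGet? chars t ≠ PySem.List.pyGet? chars (t + n) then
            PySem.Set.add st (PySem.Int.floordiv t n + 1)
          else st) starts1
    let ss := PySem.List.sorted starts (fun x => x)
    (ss.zip (ss.drop 1 ++ [nb])).foldl
      (fun total ab =>
        let cnt := ab.2 - ab.1
        total + (min n (L - ab.1 * n) +
          (if cnt = 1 then 0 else ((PySem.Int.toChars cnt).length : Int)))) 0

-- ===== PRECONDITION & SPEC =====
-- Pre_ excludes nonempty s with n ≤ 0, where A never returns: range(i+n, len(s), 0) raises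
-- ValueError and a negative n makes the while loop run forever.
def Pre_solve (n : Int) (s : String) : Prop := s = "" ∨ 1 ≤ n
instance (n : Int) (s : String) : Decidable (Pre_solve n s) := by unfold Pre_solve; infer_instance
def pvWitness_solve : Int × String := (2, "aabbaccc")

def Spec_solve (n : Int) (s : String) (out : Int) : Prop := out = solve_alt n s
instance (n : Int) (s : String) (out : Int) : Decidable (Spec_solve n s out) := by unfold Spec_solve; infer_instance

-- ===== CLAIM (what is proved, stated in full; the proofs are below) =====
def Claim_equal_solve : Prop := ∀ (n : Int) (s : String), Dom_solve n s → Pre_solve n s → Spec_solve n s (solve n s)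

-- ===== LEMMAS AND PROOFS =====

def chunks (nn : Nat) : List Char → List (List Char)
  | [] => []
  | c :: rest => ((c :: rest).take nn) :: chunks nn (rest.drop (nn - 1))
termination_by l => l.length
decreasing_by simp

def countLead (b : List Char) : List (List Char) → Nat
  | [] => 0
  | x :: xs => if x = b then countLead b xs + 1 else 0
theorem countLead_le (b : List Char) (l : List (List Char)) : countLead b l ≤ l.length := by
  induction l with
  | nil => simp [countLead]
  | cons x xs ih => simp only [countLead, List.length_cons]; split_ifs <;> omega
theorem countLead_getD_lt (b : List Char) (l : List (List Char)) :
    ∀ j < countLead b l, l.getD j [] = b := by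
  induction l with
  | nil => simp [countLead]
  | cons x xs ih =>
    intro j hj
    simp only [countLead] at hj
    split_ifs at hj with hx
    · cases j with
      | zero => simpa using hx
      | succ j => exact ih j (by omega)
    · omega
theorem countLead_getD_self (b : List Char) (l : List (List Char))
    (h : countLead b l < l.length) : l.getD (countLead b l) [] ≠ b := by
  induction l with
  | nil => simp [countLead] at h
  | cons x xs ih =>
    simp only [countLead] at h ⊢
    split_ifs with hx
    · rw [if_pos hx] at h
      simpa using ih (by simpa using h)
    · simpa using hx
def runStarts : List (List Char) → Int → List Int
  | [], _ => []
  | b :: rest, k =>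
    let c := countLead b rest
    k :: runStarts (rest.drop c) (k + (c : Int) + 1)
termination_by l => l.length
decreasing_by simp

theorem runStarts_ge (bs : List (List Char)) (k : Int) : ∀ x ∈ runStarts bs k, k ≤ x := by
  induction bs, k using runStarts.induct with
  | case1 k => simp [runStarts]
  | case2 b rest k c ih =>
    intro x hx
    rw [runStarts] at hx
    rcases List.mem_cons.mp hx with rfl | hx'
    · exact le_refl x
    · exact le_trans (by omega) (ih x hx')

theorem runStarts_pairwise (bs : List (List Char)) (k : Int) :
    (runStarts bs k).Pairwise (· < ·) := by
  induction bs, k using runStarts.induct with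
  | case1 k => simp [runStarts]
  | case2 b rest k c ih =>
    rw [runStarts]
    refine List.Pairwise.cons ?_ ih
    intro x hx
    have := runStarts_ge _ _ x hx
    omega

theorem getD_drop' (l : List (List Char)) (c i : Nat) :
    (l.drop c).getD i [] = l.getD (c + i) [] := by
  simp [List.getD_eq_getElem?_getD, List.getElem?_drop]

theorem mem_runStarts (bs : List (List Char)) (k : Int) :
    ∀ x, x ∈ runStarts bs k ↔
      ∃ j : Nat, j < bs.length ∧ x = k + (j : Int) ∧
        (j = 0 ∨ bs.getD j [] ≠ bs.getD (j - 1) []) := by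
  induction bs, k using runStarts.induct with
  | case1 k => simp [runStarts]
  | case2 b rest k c ih =>
    have hcv : c = countLead b rest := rfl
    have hcle : countLead b rest ≤ rest.length := countLead_le b rest
    have hble : ∀ i : Nat, i ≤ countLead b rest → (b :: rest).getD i [] = b := by
      intro i hi
      cases i with
      | zero => simp
      | succ m => simpa using countLead_getD_lt b rest m (by omega)
    intro x
    rw [runStarts, List.mem_cons, ih]
    constructor
    · rintro (rfl | ⟨j, hj, rfl, hcond⟩)
      · exact ⟨0, by simp, by simp, Or.inl rfl⟩
      · simp only [List.length_drop] at hj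
        refine ⟨c + 1 + j, by simp only [List.length_cons]; omega, by push_cast; ring, Or.inr ?_⟩
        rcases j with _ | j
        · -- new run at block c+1
          rcases hcond with _ | hne
          · have hlen : countLead b rest < rest.length := by omega
            have h1 : (b :: rest).getD (c + 1 + 0) [] = rest.getD c [] := by
              simp [hcv]
            have h2 : (b :: rest).getD (c + 1 + 0 - 1) [] = b := by
              simpa using hble c (by omega)
            rw [h1, h2, hcv]
            exact countLead_getD_self b rest hlen
          · exact absurd rfl hne
        · rcases hcond with h0 | hne
          · exact absurd h0 (by omega)
          · have e1 : (b :: rest).getD (c + 1 + (j + 1)) [] = (rest.drop c).getD (j + 1) [] := by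
              rw [getD_drop']
              have : c + 1 + (j + 1) = (c + (j + 1)) + 1 := by omega
              rw [this]
              simp
            have e2 : (b :: rest).getD (c + 1 + (j + 1) - 1) [] = (rest.drop c).getD j [] := by
              rw [getD_drop']
              have : c + 1 + (j + 1) - 1 = (c + j) + 1 := by omega
              rw [this]
              simp
            rw [e1, e2]
            simpa using hne
    · rintro ⟨j, hj, rfl, hcond⟩
      simp only [List.length_cons] at hj
      rcases j with _ | j
      · exact Or.inl (by simp)
      · right
        rcases hcond with h0 | hne
        · exact absurd h0 (by omega)
        · -- j+1 ≥ 1; it cannot lie inside the leading run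
          have hgt : countLead b rest < j + 1 := by
            by_contra hle2
            have hA : (b :: rest).getD (j + 1) [] = b := hble (j + 1) (by omega)
            have hB : (b :: rest).getD (j + 1 - 1) [] = b := hble j (by omega)
            exact hne (by rw [hA, hB])
          rcases Nat.lt_or_ge (j + 1) (c + 2) with hcase | hcase
          · -- j + 1 = c + 1 : head of the recursive call
            have hjc : j = c := by omega
            refine ⟨0, ?_, ?_, Or.inl rfl⟩
            · simp only [List.length_drop]; omega
            · push_cast; omega
          · -- j + 1 ≥ c + 2 : strictly inside the recursive call
            refine ⟨j - c, ?_, ?_, Or.inr ?_⟩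
            · simp only [List.length_drop]; omega
            · have : ((j - c : Nat) : Int) = (j : Int) - (c : Int) := by push_cast; omega
              rw [this]; push_cast; ring
            · have e1 : (rest.drop c).getD (j - c) [] = (b :: rest).getD (j + 1) [] := by
                rw [getD_drop']
                have : c + (j - c) = j := by omega
                rw [this]; simp
              have e2 : (rest.drop c).getD (j - c - 1) [] = (b :: rest).getD j [] := by
                rw [getD_drop']
                have : c + (j - c - 1) = j - 1 := by omega
                rw [this]
                cases j with
                | zero => omega
                | succ m => simp
              rw [e1, e2]
              simpa using hne

def bTotal : List (List Char) → Int
  | [] => 0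
  | b :: rest =>
    let c := countLead b rest
    (if (1 : Int) + (c : Int) = 1 then (b.length : Int)
     else ((PySem.Int.toChars ((1 : Int) + (c : Int))).length : Int) + (b.length : Int))
      + bTotal (rest.drop c)
termination_by l => l.length
decreasing_by simp

theorem runStarts_head (bs : List (List Char)) (k : Int) (h : bs ≠ []) :
    ∃ tl, runStarts bs k = k :: tl := by
  cases bs with
  | nil => exact absurd rfl h
  | cons b rest => exact ⟨_, by rw [runStarts]⟩

theorem zipfold (f : Int → Int) : ∀ (bs : List (List Char)) (k acc : Int), bs ≠ [] →
    (∀ j : Nat, j < bs.length → f (k + (j : Int)) = ((bs.getD j []).length : Int)) →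
    ((runStarts bs k).zip ((runStarts bs k).drop 1 ++ [k + (bs.length : Int)])).foldl
      (fun total ab =>
        total + (f ab.1 +
          (if ab.2 - ab.1 = 1 then 0 else ((PySem.Int.toChars (ab.2 - ab.1)).length : Int)))) acc
    = acc + bTotal bs := by
  have main : ∀ (m : Nat) (bs : List (List Char)) (k acc : Int), bs.length ≤ m → bs ≠ [] →
      (∀ j : Nat, j < bs.length → f (k + (j : Int)) = ((bs.getD j []).length : Int)) →
      ((runStarts bs k).zip ((runStarts bs k).drop 1 ++ [k + (bs.length : Int)])).foldl
        (fun total ab =>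
          total + (f ab.1 +
            (if ab.2 - ab.1 = 1 then 0 else ((PySem.Int.toChars (ab.2 - ab.1)).length : Int)))) acc
      = acc + bTotal bs := by
    intro m
    induction m with
    | zero =>
      intro bs k acc hm hne _
      cases bs with
      | nil => exact absurd rfl hne
      | cons b rest => simp at hm
    | succ m IH =>
      intro bs k acc hm hne hf
      cases bs with
      | nil => exact absurd rfl hne
      | cons b rest =>
        have hcle : countLead b rest ≤ rest.length := countLead_le b rest
        rw [runStarts, bTotal]
        set c := countLead b rest with hcv
        set rest' := rest.drop c with hr'
        have hrl : rest'.length + c = rest.length := by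
          rw [hr']
          simp only [List.length_drop]
          omega
        clear_value c
        clear_value rest'
        have hf0 : f k = (b.length : Int) := by simpa using hf 0 (by simp)
        have hcnt : ∀ q : Int, q = k + (c : Int) + 1 →
            (if q - k = 1 then (0:Int) else ((PySem.Int.toChars (q - k)).length : Int))
            = (if (1 : Int) + (c : Int) = 1 then (0:Int)
               else ((PySem.Int.toChars ((1 : Int) + (c : Int))).length : Int)) := by
          intro q hq
          have : q - k = 1 + (c : Int) := by omega
          rw [this]
        by_cases hre : rest' = []
        · have hlc : rest.length = c := by
            rw [hr'] at hre
            have := List.drop_eq_nil_iff.mp hre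
            omega
          have hlen : ((b :: rest).length : Int) = (c : Int) + 1 := by
            simp only [List.length_cons]
            push_cast
            omega
          rw [hre, runStarts]
          simp only [List.zip_cons_cons, List.drop_succ_cons, List.drop_nil, List.nil_append,
            List.zip_nil_right, List.foldl_cons, List.foldl_nil, hre, bTotal, hlen]
          rw [hf0, hcnt (k + ((c : Int) + 1)) (by ring)]
          split_ifs <;> ring
        · obtain ⟨tl, htl⟩ := runStarts_head rest' (k + (c : Int) + 1) hre
          rw [htl]
          simp only [List.drop_succ_cons, List.drop_zero, List.cons_append, List.zip_cons_cons,
            List.foldl_cons]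
          have hlen2 : k + ((b :: rest).length : Int) = (k + (c : Int) + 1) + (rest'.length : Int) := by
            rw [hr']
            simp only [List.length_cons, List.length_drop]
            push_cast
            omega
          have hf' : ∀ j : Nat, j < rest'.length →
              f ((k + (c : Int) + 1) + (j : Int)) = ((rest'.getD j []).length : Int) := by
            intro j hj
            have e : (k + (c : Int) + 1) + (j : Int) = k + ((c + 1 + j : Nat) : Int) := by
              push_cast; ring
            rw [e, hf (c + 1 + j) (by simp only [List.length_cons]; omega)]
            rw [hr', getD_drop']
            have hidx : c + 1 + j = (c + j) + 1 := by omega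
            rw [hidx]
            simp
          have hzip : ((k + (c:Int) + 1) :: tl).zip (tl ++ [(k + (c:Int) + 1) + (rest'.length : Int)])
              = (runStarts rest' (k + (c:Int) + 1)).zip
                  ((runStarts rest' (k + (c:Int) + 1)).drop 1 ++ [(k + (c:Int) + 1) + (rest'.length : Int)]) := by
            rw [htl]
            simp
          rw [hlen2, hzip,
            IH rest' (k + (c : Int) + 1) _
              (by simp only [hr', List.length_drop]; simp only [List.length_cons] at hm; omega)
              hre hf']
          rw [hf0, hcnt (k + (c : Int) + 1) rfl]
          split_ifs <;> ring
  exact fun bs k acc => main bs.length bs k acc le_rfl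
theorem pyRange_pos_cons (a b s : Int) (hs : 0 < s) (hab : a < b) :
    PySem.List.pyRange a b s = a :: PySem.List.pyRange (a + s) b s := by
  have hs0 : s ≠ 0 := by omega
  rw [PySem.List.pyRange_of_pos a b hs, PySem.List.pyRange_of_pos (a + s) b hs, if_pos hab]
  have key : ((b - a + s - 1) / s).toNat
      = (if a + s < b then ((b - (a + s) + s - 1) / s).toNat else 0) + 1 := by
    by_cases h2 : a + s < b
    · rw [if_pos h2]
      have e1 : b - a + s - 1 = (b - a - 1) + 1 * s := by ring
      have e2 : b - (a + s) + s - 1 = b - a - 1 := by ring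
      rw [e1, e2, Int.add_mul_ediv_right _ _ hs0]
      have h3 : 0 ≤ (b - a - 1) / s := Int.ediv_nonneg (by omega) (by omega)
      omega
    · rw [if_neg h2]
      have e1 : b - a + s - 1 = (b - a - 1) + 1 * s := by ring
      rw [e1, Int.add_mul_ediv_right _ _ hs0]
      have h3 : (b - a - 1) / s = 0 := Int.ediv_eq_zero_of_lt (by omega) (by omega)
      omega
  rw [key, List.range_succ_eq_map, List.map_cons, List.map_map]
  congr 1
  · simp
  · apply List.map_congr_left
    intro k _
    simp only [Function.comp_apply]
    push_cast
    ring

theorem pyRange_pos_nil (a b s : Int) (hs : 0 < s) (hab : b ≤ a) :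
    PySem.List.pyRange a b s = [] := by
  rw [PySem.List.pyRange_of_pos a b hs]
  simp [if_neg (not_lt.mpr hab)]

theorem chunks_cons (nn : Nat) (h : 1 ≤ nn) (l : List Char) (hl : l ≠ []) :
    chunks nn l = l.take nn :: chunks nn (l.drop nn) := by
  cases l with
  | nil => exact absurd rfl hl
  | cons c rest =>
    cases nn with
    | zero => omega
    | succ m => simp [chunks]

theorem chunks_drop_mul (nn : Nat) (h : 1 ≤ nn) (k : Nat) (t : List Char) :
    chunks nn (t.drop (nn * k)) = (chunks nn t).drop k := by
  induction k generalizing t with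
  | zero => simp
  | succ k ih =>
    cases t with
    | nil => simp [chunks]
    | cons c rest =>
      rw [chunks_cons nn h (c :: rest) (by simp), List.drop_succ_cons, ← ih]
      congr 1
      rw [List.drop_drop, Nat.mul_succ, Nat.add_comm]

theorem chunks_length_le (nn : Nat) (t : List Char) :
    (chunks nn t).length ≤ t.length := by
  induction t using chunks.induct nn with
  | case1 => simp [chunks]
  | case2 c rest ih =>
    simp only [chunks, List.length_cons]
    have := List.length_drop (l := rest) (i := nn - 1)
    omega

theorem forCnt_eq_countLead (chars : List Char) (n : Int) (tmp : List Char)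
    (hn : 1 ≤ n) : ∀ (j c : Int), 0 ≤ j →
    forCnt chars n tmp (PySem.List.pyRange j chars.length n) c
      = c + (countLead tmp (chunks n.toNat (chars.drop j.toNat)) : Int) := by
  have main : ∀ (m : Nat) (j c : Int), 0 ≤ j → chars.length - j.toNat ≤ m →
      forCnt chars n tmp (PySem.List.pyRange j chars.length n) c
        = c + (countLead tmp (chunks n.toNat (chars.drop j.toNat)) : Int) := by
    intro m
    induction m with
    | zero =>
      intro j c hj hle
      rw [pyRange_pos_nil _ _ _ (by omega) (by omega),
        List.drop_eq_nil_iff.mpr (by omega)]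
      simp [forCnt, chunks, countLead]
    | succ m ih =>
      intro j c hj hle
      by_cases hlt : j < (chars.length : Int)
      · have h1 : (j + n).toNat - j.toNat = n.toNat := by omega
        have h2 : (j + n).toNat = j.toNat + n.toNat := by omega
        rw [pyRange_pos_cons j chars.length n (by omega) hlt,
          chunks_cons n.toNat (by omega) (chars.drop j.toNat)
            (by rw [Ne, List.drop_eq_nil_iff]; omega)]
        simp only [forCnt, countLead]
        rw [PySem.List.slice_toNat chars hj (by omega), h1]
        by_cases heq : List.take n.toNat (List.drop j.toNat chars) = tmp
        · rw [if_pos heq, if_pos heq,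
            ih (j + n) (c + 1) (by omega) (by omega), h2, ← List.drop_drop]
          push_cast
          ring
        · rw [if_neg heq, if_neg heq]
          simp
      · rw [pyRange_pos_nil _ _ _ (by omega) (by omega),
          List.drop_eq_nil_iff.mpr (by omega)]
        simp [forCnt, chunks, countLead]
  exact fun j c hj => main chars.length j c hj (by omega)

theorem whileLoop_eq_bTotal (chars : List Char) (n : Int) (hn : 1 ≤ n) :
    ∀ (fuel : Nat) (i : Int), 0 ≤ i →
      (chunks n.toNat (chars.drop i.toNat)).length ≤ fuel →
      ∀ (result : List Char),
        ((whileLoop n chars fuel i result).length : Int)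
          = (result.length : Int) + bTotal (chunks n.toNat (chars.drop i.toNat)) := by
  intro fuel
  induction fuel with
  | zero =>
    intro i hi hf result
    have hnil : chunks n.toNat (chars.drop i.toNat) = [] :=
      List.length_eq_zero_iff.mp (by omega)
    rw [hnil]
    simp [whileLoop, bTotal]
  | succ fuel ih =>
    intro i hi hf result
    by_cases hlt : i < (chars.length : Int)
    · have hnonnil : chars.drop i.toNat ≠ [] := by rw [Ne, List.drop_eq_nil_iff]; omega
      have h1 : (i + n).toNat - i.toNat = n.toNat := by omega
      have h2 : (i + n).toNat = i.toNat + n.toNat := by omega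
      simp only [whileLoop, if_pos hlt]
      rw [PySem.List.slice_toNat chars hi (by omega), h1,
        forCnt_eq_countLead chars n _ hn (i + n) 1 (by omega), h2, ← List.drop_drop,
        chunks_cons n.toNat (by omega) (chars.drop i.toNat) hnonnil]
      set x := List.take n.toNat (List.drop i.toNat chars) with hx
      set rest := chunks n.toNat (List.drop n.toNat (List.drop i.toNat chars)) with hrest
      set C := countLead x rest with hC
      have hK : ((n.toNat * (1 + C) : Nat) : Int) = n * (1 + (C : Int)) := by
        push_cast
        rw [Int.toNat_of_nonneg (by omega)]
      have hstep : i + n * (1 + (C : Int)) = i + ((n.toNat * (1 + C) : Nat) : Int) := by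
        rw [hK]
      have hdrop : chars.drop ((i + ((n.toNat * (1 + C) : Nat) : Int)).toNat)
          = (List.drop n.toNat (List.drop i.toNat chars)).drop (n.toNat * C) := by
        rw [List.drop_drop, List.drop_drop]
        congr 1
        have : i.toNat + n.toNat * (1 + C) = i.toNat + (n.toNat + n.toNat * C) := by ring_nf
        omega
      have hchunks : chunks n.toNat (chars.drop ((i + ((n.toNat * (1 + C) : Nat) : Int)).toNat))
          = rest.drop C := by
        rw [hdrop, chunks_drop_mul n.toNat (by omega) C, hrest]
      rw [hstep, ih (i + ((n.toNat * (1 + C) : Nat) : Int)) (by omega)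
        (by
          rw [hchunks]
          have hf' : (x :: rest).length ≤ fuel + 1 := by
            rw [hx, hrest, ← chunks_cons n.toNat (by omega) (chars.drop i.toNat) hnonnil]
            exact hf
          simp only [List.length_drop, List.length_cons] at hf' ⊢
          omega) _]
      rw [hchunks, bTotal]
      simp only [List.length_append]
      by_cases hc0 : C = 0
      · rw [← hC, hc0]
        norm_num
        ring
      · rw [← hC, if_pos (by omega : (1:Int) < 1 + (C:Int)), if_neg (by omega : ¬ ((1:Int) + (C:Int) = 1))]
        simp only [List.length_append]
        push_cast
        ring
    · have hnil : chunks n.toNat (chars.drop i.toNat) = [] := by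
        rw [List.drop_eq_nil_iff.mpr (by omega)]
        simp [chunks]
      rw [hnil]
      simp only [whileLoop, if_neg hlt]
      simp [bTotal]


-- ---------- B-side lemmas ----------

theorem chunks_getD (N : Nat) (hN : 1 ≤ N) (l : List Char) (k : Nat) :
    (chunks N l).getD k [] = (l.drop (N * k)).take N := by
  have h := chunks_drop_mul N hN k l
  by_cases hnil : l.drop (N * k) = []
  · rw [hnil] at h ⊢
    have : (chunks N l).drop k = [] := by rw [← h]; simp [chunks]
    have hlen := List.drop_eq_nil_iff.mp this
    rw [List.getD_eq_getElem?_getD, List.getElem?_eq_none (by omega)]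
    simp
  · rw [chunks_cons N hN _ hnil] at h
    have : (chunks N l).getD k [] = ((chunks N l).drop k).getD 0 [] := by
      simp [List.getD_eq_getElem?_getD, List.getElem?_drop]
    rw [this, ← h]
    simp

theorem chunks_length_bracket (N : Nat) (hN : 1 ≤ N) (l : List Char) (hl : l ≠ []) :
    ((chunks N l).length - 1) * N < l.length ∧ l.length ≤ (chunks N l).length * N
      ∧ 1 ≤ (chunks N l).length := by
  have main : ∀ (m : Nat) (l : List Char), l.length ≤ m → l ≠ [] →
      ((chunks N l).length - 1) * N < l.length ∧ l.length ≤ (chunks N l).length * N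
        ∧ 1 ≤ (chunks N l).length := by
    intro m
    induction m with
    | zero =>
      intro l hm hne
      cases l with
      | nil => exact absurd rfl hne
      | cons c r => simp at hm
    | succ m ih =>
      intro l hm hne
      rw [chunks_cons N hN l hne]
      by_cases hd : l.drop N = []
      · have hlen : l.length ≤ N := by
          have := List.drop_eq_nil_iff.mp hd
          omega
        rw [hd]
        simp only [chunks, List.length_cons, List.length_nil]
        constructor
        · simpa using List.length_pos_of_ne_nil hne
        · omega
      · have hlen : N < l.length := by
          by_contra hcon
          exact hd (List.drop_eq_nil_iff.mpr (by omega))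
        obtain ⟨h1, h2, h3⟩ := ih (l.drop N) (by simp only [List.length_drop]; omega) hd
        simp only [List.length_drop] at h1 h2
        simp only [List.length_cons]
        refine ⟨?_, ?_, by omega⟩
        · have : ((chunks N (l.drop N)).length + 1 - 1) * N
              = ((chunks N (l.drop N)).length - 1) * N + N := by
            have h4 : (chunks N (l.drop N)).length = ((chunks N (l.drop N)).length - 1) + 1 := by omega
            calc ((chunks N (l.drop N)).length + 1 - 1) * N
                = (chunks N (l.drop N)).length * N := by rw [Nat.add_sub_cancel]
              _ = (((chunks N (l.drop N)).length - 1) + 1) * N := by rw [← h4]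
              _ = ((chunks N (l.drop N)).length - 1) * N + N := by ring
          omega
        · have : ((chunks N (l.drop N)).length + 1) * N = (chunks N (l.drop N)).length * N + N := by ring
          omega
  exact main l.length l le_rfl hl

theorem blockEq_iff (l : List Char) (a b N : Nat)
    (ha : a + N ≤ l.length) (hb : b + N ≤ l.length) :
    ((l.drop a).take N = (l.drop b).take N) ↔ ∀ o < N, l[a + o]? = l[b + o]? := by
  constructor
  · intro h o ho
    have := congrArg (fun t => t[o]?) h
    simpa [List.getElem?_take, List.getElem?_drop, ho] using this
  · intro h
    apply List.ext_getElem?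
    intro i
    by_cases hi : i < N
    · simp [List.getElem?_take, List.getElem?_drop, hi, h i hi]
    · simp [List.getElem?_take, hi]
theorem mem_foldl_addIf (l : List Int) (g : Int → Int) (q : Int → Prop) [DecidablePred q]
    (s0 : PySem.Set Int) (x : Int) :
    x ∈ l.foldl (fun st t => if q t then PySem.Set.add st (g t) else st) s0 ↔
      x ∈ s0 ∨ ∃ t ∈ l, q t ∧ g t = x := by
  induction l generalizing s0 with
  | nil => simp
  | cons t ts ih =>
    simp only [List.foldl_cons, ih]
    by_cases hq : q t
    · rw [if_pos hq, PySem.Set.mem_add]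
      constructor
      · rintro (⟨h | h⟩ | ⟨u, hu, hqu, hgu⟩)
        · exact Or.inl h
        · exact Or.inr ⟨t, by simp, hq, h.symm⟩
        · exact Or.inr ⟨u, by simp [hu], hqu, hgu⟩
      · rintro (h | ⟨u, hu, hqu, hgu⟩)
        · exact Or.inl (Or.inl h)
        · rcases List.mem_cons.mp hu with rfl | hu'
          · exact Or.inl (Or.inr hgu.symm)
          · exact Or.inr ⟨u, hu', hqu, hgu⟩
    · rw [if_neg hq]
      constructor
      · rintro (h | ⟨u, hu, hqu, hgu⟩)
        · exact Or.inl h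
        · exact Or.inr ⟨u, by simp [hu], hqu, hgu⟩
      · rintro (h | ⟨u, hu, hqu, hgu⟩)
        · exact Or.inl h
        · rcases List.mem_cons.mp hu with rfl | hu'
          · exact absurd hqu hq
          · exact Or.inr ⟨u, hu', hqu, hgu⟩

theorem nodup_foldl_addIf (l : List Int) (g : Int → Int) (q : Int → Prop) [DecidablePred q]
    (s0 : PySem.Set Int) (h : s0.Nodup) :
    (l.foldl (fun st t => if q t then PySem.Set.add st (g t) else st) s0).Nodup := by
  induction l generalizing s0 with
  | nil => simpa
  | cons t ts ih =>
    simp only [List.foldl_cons]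
    apply ih
    split_ifs
    · exact PySem.Set.nodup_add _ _ h
    · exact h

theorem solve_alt_eq_bTotal (n : Int) (s : String) (hn : 1 ≤ n) (hne : s.toList ≠ []) :
    solve_alt n s = bTotal (chunks n.toNat s.toList) := by
  unfold solve_alt
  set chars := s.toList with hch
  set N := n.toNat with hNv
  have hnN : (N : Int) = n := by omega
  have hN1 : 1 ≤ N := by omega
  set L : Nat := chars.length with hLv
  have hL1 : 1 ≤ L := List.length_pos_of_ne_nil hne
  rw [if_neg (by exact_mod_cast (by omega : ¬ (L : Int) = 0))]
  set bs := chunks N chars with hbs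
  obtain ⟨hbr1, hbr2, hbr3⟩ := chunks_length_bracket N hN1 chars hne
  set B := bs.length with hBv
  -- nb = B
  have hnb : -(PySem.Int.floordiv (-(L : Int)) n) = (B : Int) := by
    rw [PySem.Int.neg_floordiv_neg_eq_iff_of_pos (by omega)]
    constructor
    · have : (((B - 1) * N : Nat) : Int) = ((B : Int) - 1) * n := by
        push_cast [Nat.cast_sub hbr3, hnN]
        ring
      calc ((B : Int) - 1) * n = (((B - 1) * N : Nat) : Int) := this.symm
        _ < (L : Int) := by exact_mod_cast hbr1
    · calc (L : Int) ≤ ((B * N : Nat) : Int) := by exact_mod_cast hbr2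
        _ = (B : Int) * n := by push_cast [hnN]; ring
  -- the initial set, by cases on divisibility
  have hgetD : ∀ k : Nat, bs.getD k [] = (chars.drop (N * k)).take N := fun k =>
    chunks_getD N hN1 chars k
  have hblen : ∀ k : Nat, (bs.getD k []).length = min N (L - N * k) := by
    intro k
    rw [hgetD k]
    simp only [List.length_take, List.length_drop]
    rw [← hLv]
  have hfull_lt : ∀ k : Nat, k + 1 < B → N * k + N ≤ L := by
    intro k hk
    calc N * k + N = N * (k + 1) := by ring
      _ ≤ N * (B - 1) := Nat.mul_le_mul_left N (by omega)
      _ = (B - 1) * N := by ring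
      _ ≤ L := le_of_lt hbr1
  have hshort_ne : ∀ j : Nat, 1 ≤ j → j < B → L < N * j + N →
      bs.getD j [] ≠ bs.getD (j - 1) [] := by
    intro j h1 hjB hlt heq
    have hprev : N * (j - 1) + N ≤ L := by
      have := hfull_lt (j - 1) (by omega)
      exact this
    have e1 := hblen j
    have e2 := hblen (j - 1)
    rw [heq, e2] at e1
    have hNjL : N * j < L := by
      have hj' : j - 1 + 1 = j := by omega
      have he : N * (j - 1) + N = N * j := by
        calc N * (j - 1) + N = N * ((j - 1) + 1) := by ring
          _ = N * j := by rw [hj']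
      omega
    omega
  -- a full block j compared with the (always full) previous block, via characters
  have hfull_iff : ∀ j : Nat, 1 ≤ j → j < B → N * j + N ≤ L →
      (bs.getD j [] = bs.getD (j - 1) [] ↔
        ∀ o < N, chars[N * (j - 1) + o]? = chars[N * j + o]?) := by
    intro j h1 hjB hfl
    have hprev : N * (j - 1) + N ≤ L := hfull_lt (j - 1) (by omega)
    rw [hgetD j, hgetD (j - 1)]
    rw [blockEq_iff chars (N * j) (N * (j - 1)) N hfl hprev]
    constructor
    · intro h o ho
      exact (h o ho).symm
    · intro h o ho
      exact (h o ho).symm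
  -- the built boundary set has exactly the run-start indices as members
  set s0 : PySem.Set Int := PySem.Set.ofList [0] with hs0
  set s1 : PySem.Set Int :=
    (if PySem.Int.mod (L : Int) n ≠ 0 then PySem.Set.add s0 ((-(PySem.Int.floordiv (-(L : Int)) n)) - 1) else s0) with hs1
  have hdvd_iff : PySem.Int.mod (L : Int) n = 0 ↔ L = B * N := by
    rw [PySem.Int.mod_eq_zero_iff_dvd]
    constructor
    · rintro ⟨k, hk⟩
      have hkB : k = (B : Int) := by
        by_cases hlt : k < (B : Int)
        · exfalso
          have : n * k ≤ n * ((B : Int) - 1) := by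
            apply Int.mul_le_mul_of_nonneg_left (by omega) (by omega)
          have h2 : (((B - 1) * N : Nat) : Int) = ((B : Int) - 1) * n := by
            push_cast [Nat.cast_sub hbr3, hnN]
            ring
          have h3 : (((B - 1) * N : Nat) : Int) < (L : Int) := by exact_mod_cast hbr1
          rw [h2] at h3
          have hcomm : n * ((B : Int) - 1) = ((B : Int) - 1) * n := mul_comm _ _
          omega
        · by_cases hgt : (B : Int) < k
          · exfalso
            have : n * (B : Int) < n * k := by
              apply Int.mul_lt_mul_of_pos_left hgt (by omega)
            have h3 : (L : Int) ≤ ((B * N : Nat) : Int) := by exact_mod_cast hbr2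
            have h4 : ((B * N : Nat) : Int) = (B : Int) * n := by push_cast [hnN]; ring
            have hcomm : n * (B : Int) = (B : Int) * n := mul_comm _ _
            omega
          · omega
      have : (L : Int) = ((B * N : Nat) : Int) := by
        rw [hk, hkB]
        push_cast [hnN]
        ring
      exact_mod_cast this
    · intro hfull
      exact ⟨(B : Int), by rw [hfull]; push_cast [hnN]; ring⟩
  have hmem : ∀ x : Int,
      x ∈ (PySem.List.pyRange 0 ((L : Int) - n) 1).foldl
        (fun st t =>
          if PySem.List.pyGet? chars t ≠ PySem.List.pyGet? chars (t + n) then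
            PySem.Set.add st (PySem.Int.floordiv t n + 1)
          else st) s1 ↔ x ∈ runStarts bs 0 := by
    intro x
    rw [mem_foldl_addIf, mem_runStarts]
    have hs1mem : ∀ y : Int, y ∈ s1 ↔ (y = 0 ∨ (¬ L = B * N ∧ y = (B : Int) - 1)) := by
      intro y
      rw [hs1]
      by_cases hfull : L = B * N
      · rw [if_neg (by simp only [ne_eq, not_not]; exact hdvd_iff.mpr hfull)]
        simp [hs0, PySem.Set.ofList, PySem.Set.add, PySem.Set.contains, hfull]
      · rw [if_pos (by simp only [ne_eq, hdvd_iff]; exact hfull), hnb]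
        rw [PySem.Set.mem_add]
        constructor
        · rintro (hy | hy)
          · left
            simpa [hs0, PySem.Set.ofList, PySem.Set.add, PySem.Set.contains] using hy
          · exact Or.inr ⟨hfull, hy⟩
        · rintro (rfl | ⟨_, rfl⟩)
          · left
            simp [hs0, PySem.Set.ofList, PySem.Set.add, PySem.Set.contains]
          · right
            rfl
    constructor
    · rintro (hx | ⟨t, ht, hq, hg⟩)
      · rcases (hs1mem x).mp hx with rfl | ⟨hfull, rfl⟩
        · exact ⟨0, by omega, by simp, Or.inl rfl⟩
        · by_cases hB1 : B = 1
          · refine ⟨0, by omega, ?_, Or.inl rfl⟩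
            rw [hB1]
            simp
          · refine ⟨B - 1, by omega, ?_, Or.inr ?_⟩
            · push_cast [Nat.cast_sub hbr3]
              ring
            · apply hshort_ne (B - 1) (by omega) (by omega)
              have he : N * (B - 1) + N = B * N := by
                calc N * (B - 1) + N = N * ((B - 1) + 1) := by ring
                  _ = N * B := by rw [(by omega : B - 1 + 1 = B)]
                  _ = B * N := by ring
              omega
      · -- a mismatch position t
        rw [PySem.List.mem_pyRange_one] at ht
        obtain ⟨ht0, htlt⟩ := ht
        have hfd : PySem.Int.floordiv t n = x - 1 := by omega
        rw [PySem.Int.floordiv_eq_iff_of_pos (by omega)] at hfd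
        obtain ⟨hlo, hhi⟩ := hfd
        have hring1 : (x - 1 + 1) * n = (x - 1) * n + n := by ring
        have hx1 : 1 ≤ x := by
          have h0 : 0 ≤ PySem.Int.floordiv t n := by
            have := PySem.Int.floordiv_natCast t.toNat N
            rw [(by omega : ((t.toNat : Nat) : Int) = t), hnN] at this
            rw [this]
            positivity
          omega
        set j : Nat := x.toNat with hj
        have hxj : x = (j : Int) := by omega
        have hjB : j < B := by
          by_contra hcon
          have h1 : ((B : Int) - 1) * n ≤ (x - 1) * n :=
            Int.mul_le_mul_of_nonneg_right (by omega) (by omega)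
          have h2 : (L : Int) ≤ (B : Int) * n := by
            rw [← hnN]
            exact_mod_cast hbr2
          have h3 : (B : Int) * n = ((B : Int) - 1) * n + n := by ring
          omega
        have ho : 0 ≤ t - (x - 1) * n ∧ t - (x - 1) * n < n := by omega
        set o : Nat := (t - (x - 1) * n).toNat with hov
        have hoI : (o : Int) = t - (x - 1) * n := Int.toNat_of_nonneg ho.1
        have hcomm : n * (x - 1) = (x - 1) * n := mul_comm _ _
        have hto : t = ((N * (j - 1) + o : Nat) : Int) := by
          have e : ((N * (j - 1) + o : Nat) : Int) = n * ((j : Int) - 1) + (o : Int) := by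
            push_cast [Nat.cast_sub (by omega : 1 ≤ j), hnN]
            ring
          rw [e, hoI, ← hxj]
          omega
        have htno : t + n = ((N * j + o : Nat) : Int) := by
          have e : ((N * j + o : Nat) : Int) = n * (j : Int) + (o : Int) := by
            push_cast [hnN]
            ring
          have e2 : n * (j : Int) = n * ((j : Int) - 1) + n := by ring
          rw [e, hoI, e2, ← hxj]
          omega
        refine ⟨j, hjB, by rw [hxj]; ring_nf, Or.inr ?_⟩
        by_cases hfl : N * j + N ≤ L
        · intro heq
          have hall := (hfull_iff j (by omega) hjB hfl).mp heq
          apply hq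
          have hval := hall o (by omega)
          have htno2 : ((N * (j - 1) + o : Nat) : Int) + n = ((N * j + o : Nat) : Int) := by
            rw [← hto]
            exact htno
          rw [hto, htno2, PySem.List.pyGet?_natCast, PySem.List.pyGet?_natCast]
          exact hval
        · exact hshort_ne j (by omega) hjB (by omega)
    · rintro ⟨j, hjB, rfl, hcond⟩
      rcases hcond with rfl | hne2
      · exact Or.inl ((hs1mem _).mpr (Or.inl (by simp)))
      · have hj1 : 1 ≤ j := by
          rcases Nat.eq_zero_or_pos j with rfl | h
          · exact absurd rfl hne2
          · exact h
        by_cases hfl : N * j + N ≤ L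
        · -- full block: extract a character mismatch
          right
          have hnall : ¬ ∀ o < N, chars[N * (j - 1) + o]? = chars[N * j + o]? := by
            rw [← hfull_iff j hj1 hjB hfl]
            exact hne2
          have hex : ∃ o, o < N ∧ chars[N * (j - 1) + o]? ≠ chars[N * j + o]? := by
            by_contra hcon
            apply hnall
            intro o ho
            by_contra hx
            exact hcon ⟨o, ho, hx⟩
          obtain ⟨o, ho, hoe⟩ := hex
          refine ⟨((N * (j - 1) + o : Nat) : Int), ?_, ?_, ?_⟩
          · rw [PySem.List.mem_pyRange_one]
            constructor
            · positivity
            · have hlt2 : N * (j - 1) + o + N < L := by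
                have he : N * (j - 1) + N = N * j := by
                  calc N * (j - 1) + N = N * ((j - 1) + 1) := by ring
                    _ = N * j := by rw [(by omega : j - 1 + 1 = j)]
                omega
              have : (((N * (j - 1) + o : Nat) : Int)) + n < (L : Int) := by
                rw [← hnN]
                exact_mod_cast hlt2
              omega
          · intro hcon
            apply hoe
            have he2 : ((N * (j - 1) + o : Nat) : Int) + n = ((N * j + o : Nat) : Int) := by
              have he : N * (j - 1) + N = N * j := by
                calc N * (j - 1) + N = N * ((j - 1) + 1) := by ring
                  _ = N * j := by rw [(by omega : j - 1 + 1 = j)]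
              push_cast [← he, hnN]
              ring
            rw [he2, PySem.List.pyGet?_natCast, PySem.List.pyGet?_natCast] at hcon
            exact hcon
          · have hfd2 : PySem.Int.floordiv ((N * (j - 1) + o : Nat) : Int) n = (j : Int) - 1 := by
              rw [PySem.Int.floordiv_eq_iff_of_pos (by omega : (0:Int) < n)]
              constructor
              · rw [← hnN]
                push_cast [Nat.cast_sub hj1]
                have h9 : ((j:Int) - 1) * (N:Int) = (N:Int) * ((j:Int) - 1) := by ring
                omega
              · rw [← hnN]
                push_cast [Nat.cast_sub hj1]
                have h9 : ((j:Int) - 1 + 1) * (N:Int) = (N:Int) * ((j:Int) - 1) + (N:Int) := by ring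
                omega
            rw [hfd2]
            ring
        · -- short block: j must be the last block, contributed by the L % n test
          left
          apply (hs1mem _).mpr
          right
          have hjlast : j = B - 1 := by
            by_contra hcon
            exact hfl (hfull_lt j (by omega))
          constructor
          · intro hfull
            have he : N * (B - 1) + N = B * N := by
              calc N * (B - 1) + N = N * ((B - 1) + 1) := by ring
                _ = N * B := by rw [(by omega : B - 1 + 1 = B)]
                _ = B * N := by ring
            rw [hjlast] at hfl
            omega
          · rw [hjlast]
            push_cast [Nat.cast_sub hbr3]
            ring
  -- nodup of the built set, strict order of runStarts, hence sorted(set) = runStarts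
  have hs1nodup : s1.Nodup := by
    rw [hs1]
    split_ifs
    · exact PySem.Set.nodup_add _ _ (PySem.Set.nodup_ofList [0])
    · exact PySem.Set.nodup_ofList [0]
  have hnodupS : ((PySem.List.pyRange 0 ((L : Int) - n) 1).foldl
      (fun st t =>
        if PySem.List.pyGet? chars t ≠ PySem.List.pyGet? chars (t + n) then
          PySem.Set.add st (PySem.Int.floordiv t n + 1)
        else st) s1).Nodup :=
    nodup_foldl_addIf _ _ _ s1 hs1nodup
  have hnodupR : (runStarts bs 0).Nodup :=
    (runStarts_pairwise bs 0).imp (fun h => ne_of_lt h)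
  have hperm : (runStarts bs 0).Perm ((PySem.List.pyRange 0 ((L : Int) - n) 1).foldl
      (fun st t =>
        if PySem.List.pyGet? chars t ≠ PySem.List.pyGet? chars (t + n) then
          PySem.Set.add st (PySem.Int.floordiv t n + 1)
        else st) s1) :=
    (List.perm_ext_iff_of_nodup hnodupR hnodupS).mpr (fun a => (hmem a).symm)
  have hsorted : PySem.List.sorted ((PySem.List.pyRange 0 ((L : Int) - n) 1).foldl
      (fun st t =>
        if PySem.List.pyGet? chars t ≠ PySem.List.pyGet? chars (t + n) then
          PySem.Set.add st (PySem.Int.floordiv t n + 1)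
        else st) s1) (fun x => x) = runStarts bs 0 :=
    PySem.List.sorted_eq_of_perm_of_pairwise_lt _ _ _ hperm (runStarts_pairwise bs 0)
  have hbsne : bs ≠ [] := by
    rw [hbs, chunks_cons N hN1 chars hne]
    simp
  have hf' : ∀ j : Nat, j < bs.length →
      min n ((L : Int) - ((0 : Int) + (j : Int)) * n) = ((bs.getD j []).length : Int) := by
    intro j hj
    have hjlt : N * j < L := by
      have h1 : N * j ≤ N * (B - 1) := Nat.mul_le_mul_left N (by omega)
      have h2 : N * (B - 1) = (B - 1) * N := by ring
      omega
    rw [hblen j]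
    have hcast : ((min N (L - N * j) : Nat) : Int)
        = min ((N : Int)) ((L : Int) - ((N * j : Nat) : Int)) := by
      push_cast [Nat.cast_sub (le_of_lt hjlt)]
      ring_nf
    rw [hcast, hnN]
    have he : ((N * j : Nat) : Int) = ((0 : Int) + (j : Int)) * n := by
      push_cast [hnN]
      ring
    rw [he]
  have hz := zipfold (fun a => min n ((L : Int) - a * n)) bs 0 0 hbsne hf'
  simp only []
  rw [← hLv, ← hs1]
  rw [hsorted, hnb]
  simp only [zero_add] at hz ⊢
  exact hz

-- ===== VERDICT (by name: the statement is the Claim_ definition above) =====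
theorem solve_spec : Claim_equal_solve := by
  intro n s _hdom hpre
  unfold Spec_solve solve
  by_cases hnil : s.toList = []
  · simp [hnil, whileLoop, solve_alt]
  · have hn : 1 ≤ n := by
      rcases hpre with h | h
      · exact absurd (by simp [h]) hnil
      · exact h
    rw [solve_alt_eq_bTotal n s hn hnil]
    rw [whileLoop_eq_bTotal s.toList n hn (s.toList.length + 1) 0 le_rfl
      (by simpa using Nat.le_succ_of_le (chunks_length_le n.toNat s.toList)) []]
    simp
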